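-- pv_equiv track=rewrite | github.com/MrBrantCode/unitest_baseline | mut_generate/mist_train_cf/cf_103768/solution.py | last_three_primes
-- ===== SOURCE A (Python) =====
-- def last_three_primes(numbers):
--     def is_prime(n):
--         if n <= 1:
--             return False
--         for i in range(2, int(n**0.5) + 1):
--             if n % i == 0:
--                 return False
--         return True
--
--     primes = []
--     for num in reversed(numbers):
--         if is_prime(num):
--             primes.append(num)
--         if len(primes) == 3:
--             break
--     return primes
-- ===== SOURCE B (Python) =====
-- def last_three_primes(numbers):
--     def is_prime(n):
--         if n <= 1:
--             return False
--         for i in range(2, int(n**0.5) + 1):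
--             if n % i == 0:
--                 return False
--         return True
--
--     primes = [n for n in numbers if is_prime(n)]
--     return primes[-3:][::-1]
-- ===== Notes on version B (the rewrite author's own statement) =====
-- stated objective: alternative
-- what changed: B drops A's bounded reverse walk with an early break: it filters the whole list for primes in forward order and recovers the answer by slicing the last three and reversing them.
import Mathlib
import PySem

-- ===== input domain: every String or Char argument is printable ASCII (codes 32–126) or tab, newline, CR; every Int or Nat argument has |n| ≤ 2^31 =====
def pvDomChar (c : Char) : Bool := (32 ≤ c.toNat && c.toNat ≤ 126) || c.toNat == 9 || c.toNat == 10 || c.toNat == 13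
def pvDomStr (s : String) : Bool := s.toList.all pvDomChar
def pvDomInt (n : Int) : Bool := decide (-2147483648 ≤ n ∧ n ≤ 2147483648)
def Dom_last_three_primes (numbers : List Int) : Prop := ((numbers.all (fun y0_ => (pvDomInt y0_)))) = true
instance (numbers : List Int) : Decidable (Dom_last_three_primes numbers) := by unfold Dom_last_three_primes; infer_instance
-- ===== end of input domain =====

-- B replaces A's bounded reverse walk with an early break by a forward filter for
-- primes followed by a [-3:] slice reversed; same cost class, different decomposition.

-- ===== PORT A =====
-- shared helper: both Pythons contain the identical nested is_prime
-- (int(n**0.5) = floor sqrt, exact on the |n| ≤ 2^31 domain → Nat.sqrt n.toNat)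
def pyIsPrime (n : Int) : Bool :=
  if n ≤ 1 then false
  else (PySem.List.pyRange 2 ((Nat.sqrt n.toNat : Int) + 1) 1).all
        (fun i => !(PySem.Int.mod n i == 0))

-- A's loop over reversed(numbers) with the len==3 break
def lastThreeLoopA : List Int → List Int → List Int
  | [], primes => primes
  | num :: rest, primes =>
    let primes' := if pyIsPrime num then primes ++ [num] else primes
    if primes'.length == 3 then primes' else lastThreeLoopA rest primes'

def last_three_primes (numbers : List Int) : List Int :=
  lastThreeLoopA numbers.reverse []

-- ===== PORT B =====
def last_three_primes_alt (numbers : List Int) : List Int :=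
  let primes := numbers.filter pyIsPrime
  -- primes[-3:] then [::-1]; xs[::-1] = xs.reverse (exact: PySem.List.slice?_none_none_neg_one)
  (PySem.List.slice primes (some (-3)) none).reverse

-- ===== PRECONDITION & SPEC =====
def Spec_last_three_primes (numbers : List Int) (out : List Int) : Prop := out = last_three_primes_alt numbers
instance (numbers : List Int) (out : List Int) : Decidable (Spec_last_three_primes numbers out) := by unfold Spec_last_three_primes; infer_instance

-- ===== CLAIM (what is proved, stated in full; the proofs are below) =====
def Claim_equal_last_three_primes : Prop := ∀ (numbers : List Int), Dom_last_three_primes numbers → Spec_last_three_primes numbers (last_three_primes numbers)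

-- ===== LEMMAS AND PROOFS =====

-- A's break-at-3 loop is "append the first (3 - |acc|) primes of the remaining list"
theorem lastThreeLoopA_eq (xs : List Int) :
    ∀ acc : List Int, acc.length < 3 →
      lastThreeLoopA xs acc = acc ++ (xs.filter pyIsPrime).take (3 - acc.length) := by
  induction xs with
  | nil => intro acc _; simp [lastThreeLoopA]
  | cons x rest ih =>
    intro acc hacc
    by_cases hp : pyIsPrime x
    · by_cases h3 : acc.length + 1 = 3
      · simp [lastThreeLoopA, hp, h3, show 3 - acc.length = 1 by omega]
      · have hlt : (acc ++ [x]).length < 3 := by simp; omega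
        simp only [lastThreeLoopA, hp, if_true, List.length_append, List.length_cons,
          List.length_nil, Nat.zero_add, beq_iff_eq]
        rw [if_neg (by omega), ih _ hlt]
        simp [hp, show 3 - acc.length = (3 - (acc.length + 1)) + 1 by omega]
    · simp only [lastThreeLoopA, hp, Bool.false_eq_true, if_false, beq_iff_eq]
      rw [if_neg (by omega), ih _ hacc]
      simp [hp]

-- primes[-3:] is the last three elements
theorem slice_neg_three (xs : List Int) :
    PySem.List.slice xs (some (-3)) none = xs.drop (xs.length - 3) := by
  rw [PySem.List.slice_some_none]
  norm_num [PySem.List.clampIdx_neg_ofNat]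

-- ===== VERDICT (by name: the statement is the Claim_ definition above) =====
theorem last_three_primes_spec : Claim_equal_last_three_primes := by
  intro numbers _
  show last_three_primes numbers = last_three_primes_alt numbers
  unfold last_three_primes
  show _ = (PySem.List.slice (numbers.filter pyIsPrime) (some (-3)) none).reverse
  rw [lastThreeLoopA_eq _ [] (by decide), slice_neg_three, ← List.take_reverse,
    ← List.filter_reverse]
  simp
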